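-- pv_equiv track=rewrite | github.com/janfreyberg/superintendent | superintendent/iterating.py | stratified_grouper
-- ===== SOURCE A (Python) =====
-- import itertools
--
-- def stratified_grouper(n, iterable, include):
--     iterator = itertools.compress(iterable, include)
--     if n == 1:
--         for item in iterator:
--             yield (item,)
--     elif n > 1:
--         while True:
--             chunk = tuple(itertools.islice(iterator, n))
--             if not chunk:
--                 return
--             yield chunk
-- ===== SOURCE B (Python) =====
-- def stratified_grouper(n, iterable, include):
--     if n < 1:
--         return
--     buf = []
--     for item, keep in zip(iterable, include):
--         if keep:
--             buf.append(item)
--             if len(buf) == n: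
--                 yield tuple(buf)
--                 buf = []
--     if buf:
--         yield tuple(buf)
-- ===== Notes on version B (the rewrite author's own statement) =====
-- stated objective: simpler
-- what changed: Replaced the islice-based chunk slicing of a compressed iterator and the n==1 special case by a single element-by-element loop over zip(iterable, include) that keeps a running buffer, flushing it at size n and once more at the end; an early return handles n < 1.
import Mathlib
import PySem

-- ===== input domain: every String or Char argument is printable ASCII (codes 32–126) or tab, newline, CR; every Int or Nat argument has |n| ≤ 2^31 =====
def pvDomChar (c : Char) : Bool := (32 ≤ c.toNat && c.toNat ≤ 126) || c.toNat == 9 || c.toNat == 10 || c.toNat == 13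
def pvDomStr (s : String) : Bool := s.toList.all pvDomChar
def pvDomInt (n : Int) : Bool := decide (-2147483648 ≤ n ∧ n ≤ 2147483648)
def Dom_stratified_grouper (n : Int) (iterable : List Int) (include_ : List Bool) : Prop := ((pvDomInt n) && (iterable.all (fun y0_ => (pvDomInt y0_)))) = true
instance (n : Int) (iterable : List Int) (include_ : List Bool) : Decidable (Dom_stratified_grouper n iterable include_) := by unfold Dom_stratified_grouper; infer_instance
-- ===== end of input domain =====

-- B replaces the islice-based chunking and the n==1 special case by one buffer-accumulator
-- pass over zip(iterable, include) (objective: simpler decomposition; same O(n) cost;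
-- both generators are ported as the list of the tuples they yield).


-- ===== PORT A =====
-- itertools.compress(iterable, include): keep the items whose selector is true (stops at the shorter).
def pvCompress (iterable : List Int) (include_ : List Bool) : List Int :=
  (iterable.zip include_).filterMap (fun p => if p.2 then some p.1 else none)

-- A's `while True` loop for n > 1: repeatedly slice off the next chunk of n items
-- (the chunk size n ≥ 2 is passed as m+1 so that each step consumes ≥ 1 element, for termination).
def pvChunksA (m : Nat) (xs : List Int) : List (List Int) :=
  match xs with
  | [] => []
  | x :: rest => ((x :: rest).take (m+1)) :: pvChunksA m (rest.drop m)
termination_by xs.length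
decreasing_by simp only [List.length_drop, List.length_cons]; omega

def stratified_grouper (n : Int) (iterable : List Int) (include_ : List Bool) : List (List Int) :=
  if n == 1 then (pvCompress iterable include_).map (fun item => [item])
  else if n > 1 then pvChunksA (n.toNat - 1) (pvCompress iterable include_)
  else []

-- ===== PORT B =====
-- one step of B's loop body: on (item, keep), if keep append to the buffer, and flush it when full.
def pvBStep (n : Int) (st : List (List Int) × List Int) (p : Int × Bool) : List (List Int) × List Int :=
  if p.2 then
    if (((st.2 ++ [p.1]).length : Int) == n) then (st.1 ++ [st.2 ++ [p.1]], [])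
    else (st.1, st.2 ++ [p.1])
  else st

-- B's trailing flush of a non-empty buffer after the loop.
def pvFinish (st : List (List Int) × List Int) : List (List Int) :=
  if st.2.isEmpty then st.1 else st.1 ++ [st.2]

def stratified_grouper_alt (n : Int) (iterable : List Int) (include_ : List Bool) : List (List Int) :=
  if n < 1 then []
  else pvFinish ((iterable.zip include_).foldl (pvBStep n) ([], []))

-- ===== PRECONDITION & SPEC =====
def Spec_stratified_grouper (n : Int) (iterable : List Int) (include_ : List Bool) (out : List (List Int)) : Prop := out = stratified_grouper_alt n iterable include_
instance (n : Int) (iterable : List Int) (include_ : List Bool) (out : List (List Int)) : Decidable (Spec_stratified_grouper n iterable include_ out) := by unfold Spec_stratified_grouper; infer_instance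

-- ===== CLAIM (what is proved, stated in full; the proofs are below) =====
def Claim_equal_stratified_grouper : Prop := ∀ (n : Int) (iterable : List Int) (include_ : List Bool), Dom_stratified_grouper n iterable include_ → Spec_stratified_grouper n iterable include_ (stratified_grouper n iterable include_)

-- ===== LEMMAS AND PROOFS =====

lemma pvChunksA_nil (m : Nat) : pvChunksA m [] = [] := by rw [pvChunksA]

lemma pvChunksA_cons (m : Nat) (x : Int) (rest : List Int) :
    pvChunksA m (x :: rest) = ((x :: rest).take (m+1)) :: pvChunksA m (rest.drop m) := by
  rw [pvChunksA]

-- B's step on the kept elements only (pvBStep when the selector is true).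
def pvGStep (n : Int) (st : List (List Int) × List Int) (x : Int) : List (List Int) × List Int :=
  if (((st.2 ++ [x]).length : Int) == n) then (st.1 ++ [st.2 ++ [x]], [])
  else (st.1, st.2 ++ [x])

lemma foldl_bstep_compress (n : Int) (l : List (Int × Bool)) (st : List (List Int) × List Int) :
    l.foldl (pvBStep n) st = (l.filterMap (fun p => if p.2 then some p.1 else none)).foldl (pvGStep n) st := by
  induction l generalizing st with
  | nil => rfl
  | cons p rest ih =>
    cases p with
    | mk x k => cases k <;> simp [pvBStep, pvGStep, ih]

lemma chunk_head (m : Nat) (c ys : List Int) (hc : c.length = m + 1) :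
    pvChunksA m (c ++ ys) = c :: pvChunksA m ys := by
  cases c with
  | nil => simp at hc
  | cons x rest =>
    have h1 : rest.length = m := by simp at hc; omega
    rw [List.cons_append, pvChunksA_cons]
    have htake : (x :: (rest ++ ys)).take (m+1) = x :: rest := by
      simp only [List.take_succ_cons]
      rw [List.take_append_of_le_length (by omega)]
      exact congrArg _ (List.take_of_length_le (by omega))
    have hdrop : (rest ++ ys).drop m = ys := by
      rw [List.drop_append_of_le_length (by omega)]
      simp [List.drop_eq_nil_of_le (by omega : rest.length ≤ m)]
    rw [htake, hdrop]

lemma main_inv (m : Nat) (ys : List Int) (acc : List (List Int)) (buf : List Int)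
    (hb : buf.length ≤ m) :
    pvFinish (ys.foldl (pvGStep ((m : Int) + 1)) (acc, buf)) = acc ++ pvChunksA m (buf ++ ys) := by
  induction ys generalizing acc buf with
  | nil =>
    cases buf with
    | nil => simp [pvFinish, pvChunksA_nil]
    | cons b bs =>
      have hbs : bs.length + 1 ≤ m := by simpa using hb
      simp only [List.foldl_nil, pvFinish, List.append_nil, pvChunksA_cons]
      rw [List.take_of_length_le (by simp; omega), List.drop_eq_nil_of_le (by omega),
        pvChunksA_nil]
      simp
  | cons y ys ih =>
    simp only [List.foldl_cons, pvGStep]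
    by_cases hL : buf.length = m
    · rw [if_pos (by simp; omega)]
      rw [ih (acc ++ [buf ++ [y]]) [] (Nat.zero_le m)]
      rw [show buf ++ y :: ys = (buf ++ [y]) ++ ys by simp]
      rw [chunk_head m (buf ++ [y]) ys (by simp [hL])]
      simp
    · have hlt : (buf ++ [y]).length ≤ m := by simp; omega
      rw [if_neg (by simp; omega)]
      rw [ih acc (buf ++ [y]) hlt]
      simp

lemma chunks_one (ys : List Int) : pvChunksA 0 ys = ys.map (fun item => [item]) := by
  induction ys with
  | nil => rw [pvChunksA_nil]; rfl
  | cons y ys ih => rw [pvChunksA_cons]; simp [ih]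

theorem stratified_grouper_eq (n : Int) (iterable : List Int) (include_ : List Bool) :
    stratified_grouper n iterable include_ = stratified_grouper_alt n iterable include_ := by
  unfold stratified_grouper stratified_grouper_alt
  rw [foldl_bstep_compress]
  have hcomp : (iterable.zip include_).filterMap (fun p => if p.2 then some p.1 else none)
      = pvCompress iterable include_ := rfl
  rw [hcomp]
  set ys := pvCompress iterable include_ with hys
  rcases lt_trichotomy n 1 with h | h | h
  · have e1 : (n == 1) = false := by simp; omega
    rw [e1]
    simp only [Bool.false_eq_true, if_false]
    rw [if_neg (by omega : ¬ n > 1), if_pos h]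
  · subst h
    rw [if_pos (by simp), if_neg (by omega : ¬ (1:Int) < 1)]
    have hmi := main_inv 0 ys [] [] (Nat.le_refl 0)
    simp only [List.nil_append, Nat.cast_zero, zero_add] at hmi
    rw [hmi, chunks_one]
  · have e1 : (n == 1) = false := by simp; omega
    rw [e1]
    simp only [Bool.false_eq_true, if_false]
    rw [if_pos (by omega : n > 1), if_neg (by omega : ¬ n < 1)]
    obtain ⟨m, hm⟩ : ∃ m : Nat, n = (m : Int) + 1 := ⟨n.toNat - 1, by omega⟩
    subst hm
    have hmt : ((m : Int) + 1).toNat - 1 = m := by omega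
    rw [hmt]
    exact (main_inv m ys [] [] (Nat.zero_le m)).symm

-- ===== VERDICT (by name: the statement is the Claim_ definition above) =====
theorem stratified_grouper_spec : Claim_equal_stratified_grouper := by
  intro n iterable include_ _
  exact stratified_grouper_eq n iterable include_
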